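-- pv_equiv track=rewrite | github.com/numarulunu/tokenomy | tuner/losses.py | detect_user_pinned
-- ===== SOURCE A (Python) =====
-- from typing import Any, Dict, Iterable, List
--
-- def detect_user_pinned(personal_settings_env: Dict[str, Any] | None) -> List[str]:
--     """Return list of tunable env vars the user has pinned in personal settings."""
--     if not personal_settings_env:
--         return []
--     tunable = {
--         "CLAUDE_CODE_MAX_OUTPUT_TOKENS",
--         "MAX_THINKING_TOKENS",
--         "CLAUDE_AUTOCOMPACT_PCT_OVERRIDE",
--         "MAX_MCP_OUTPUT_TOKENS",
--     }
--     return sorted(k for k in personal_settings_env.keys() if k in tunable)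
-- ===== SOURCE B (Python) =====
-- def detect_user_pinned(personal_settings_env):
--     """Return list of tunable env vars the user has pinned in personal settings."""
--     if not personal_settings_env:
--         return []
--     a = b = c = d = False
--     for k in personal_settings_env:
--         if k == "CLAUDE_AUTOCOMPACT_PCT_OVERRIDE":
--             a = True
--         elif k == "CLAUDE_CODE_MAX_OUTPUT_TOKENS":
--             b = True
--         elif k == "MAX_MCP_OUTPUT_TOKENS":
--             c = True
--         elif k == "MAX_THINKING_TOKENS":
--             d = True
--     out = []
--     if a:
--         out.append("CLAUDE_AUTOCOMPACT_PCT_OVERRIDE")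
--     if b:
--         out.append("CLAUDE_CODE_MAX_OUTPUT_TOKENS")
--     if c:
--         out.append("MAX_MCP_OUTPUT_TOKENS")
--     if d:
--         out.append("MAX_THINKING_TOKENS")
--     return out
-- ===== Notes on version B (the rewrite author's own statement) =====
-- stated objective: alternative
-- what changed: B replaces A's set-filter-then-sort over the env keys by a single pass that accumulates four presence flags (one per tunable name, checked in alphabetical order) and then emits the matching names from those flags, so no set, no filter and no sort call remain.
import Mathlib
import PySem

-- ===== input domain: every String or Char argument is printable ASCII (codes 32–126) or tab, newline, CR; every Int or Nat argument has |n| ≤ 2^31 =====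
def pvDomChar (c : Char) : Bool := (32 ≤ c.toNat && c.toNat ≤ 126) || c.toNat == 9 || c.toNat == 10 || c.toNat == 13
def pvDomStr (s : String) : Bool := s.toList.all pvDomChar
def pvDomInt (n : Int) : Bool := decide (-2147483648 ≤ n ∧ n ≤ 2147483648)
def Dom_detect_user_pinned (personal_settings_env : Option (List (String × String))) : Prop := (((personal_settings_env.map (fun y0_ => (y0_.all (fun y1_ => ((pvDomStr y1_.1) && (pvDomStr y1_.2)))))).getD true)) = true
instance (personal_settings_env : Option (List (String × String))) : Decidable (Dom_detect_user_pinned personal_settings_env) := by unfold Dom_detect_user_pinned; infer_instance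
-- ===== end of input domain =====

-- B replaces A's set-filter-then-sort over the env keys by a single pass accumulating four presence
-- flags (one per tunable name, in alphabetical order) and emitting the matching names from the flags
-- (alternative decomposition; same cost at this tiny constant set size).


-- ===== PORT A =====
def detect_user_pinned (personal_settings_env : Option (List (String × String))) : List String :=
  match personal_settings_env with
  | none => []
  | some l =>
    if l = [] then []
    else
      let tunable : PySem.Set String := PySem.Set.ofList
        ["CLAUDE_CODE_MAX_OUTPUT_TOKENS", "MAX_THINKING_TOKENS",
         "CLAUDE_AUTOCOMPACT_PCT_OVERRIDE", "MAX_MCP_OUTPUT_TOKENS"]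
      PySem.List.sorted
        (((PySem.Dict.ofList l).keys).filter (fun k => PySem.Set.contains tunable k))
        (fun x => x) false

-- ===== PORT B =====
-- one pass over the env items accumulating four presence flags, then emit from the flags
def pvStep (s : Bool × Bool × Bool × Bool) (kv : String × String) : Bool × Bool × Bool × Bool :=
  if kv.1 == "CLAUDE_AUTOCOMPACT_PCT_OVERRIDE" then (true, s.2)
  else if kv.1 == "CLAUDE_CODE_MAX_OUTPUT_TOKENS" then (s.1, true, s.2.2)
  else if kv.1 == "MAX_MCP_OUTPUT_TOKENS" then (s.1, s.2.1, true, s.2.2.2)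
  else if kv.1 == "MAX_THINKING_TOKENS" then (s.1, s.2.1, s.2.2.1, true)
  else s

def detect_user_pinned_alt (personal_settings_env : Option (List (String × String))) : List String :=
  match personal_settings_env with
  | none => []
  | some l =>
    if l = [] then []
    else
      let flags := l.foldl pvStep (false, false, false, false)
      (if flags.1 then ["CLAUDE_AUTOCOMPACT_PCT_OVERRIDE"] else []) ++
      (if flags.2.1 then ["CLAUDE_CODE_MAX_OUTPUT_TOKENS"] else []) ++
      (if flags.2.2.1 then ["MAX_MCP_OUTPUT_TOKENS"] else []) ++
      (if flags.2.2.2 then ["MAX_THINKING_TOKENS"] else [])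

-- ===== PRECONDITION & SPEC =====
def Spec_detect_user_pinned (personal_settings_env : Option (List (String × String))) (out : List String) : Prop := out = detect_user_pinned_alt personal_settings_env
instance (personal_settings_env : Option (List (String × String))) (out : List String) : Decidable (Spec_detect_user_pinned personal_settings_env out) := by unfold Spec_detect_user_pinned; infer_instance

-- ===== CLAIM =====
def Claim_equal_detect_user_pinned : Prop := ∀ (personal_settings_env : Option (List (String × String))), Dom_detect_user_pinned personal_settings_env → Spec_detect_user_pinned personal_settings_env (detect_user_pinned personal_settings_env)

-- ===== LEMMAS AND PROOFS =====

-- the flag fold computes, per name, whether any env key equals it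
theorem pv_fold_spec (l : List (String × String)) (s : Bool × Bool × Bool × Bool) :
    l.foldl pvStep s =
      (s.1 || l.any (fun kv => kv.1 == "CLAUDE_AUTOCOMPACT_PCT_OVERRIDE"),
       s.2.1 || l.any (fun kv => kv.1 == "CLAUDE_CODE_MAX_OUTPUT_TOKENS"),
       s.2.2.1 || l.any (fun kv => kv.1 == "MAX_MCP_OUTPUT_TOKENS"),
       s.2.2.2 || l.any (fun kv => kv.1 == "MAX_THINKING_TOKENS")) := by
  induction l generalizing s with
  | nil => simp
  | cons kv t ih =>
    simp only [List.foldl_cons, List.any_cons, pvStep]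
    split_ifs with h1 h2 h3 h4 <;> rw [ih]
    · have e : kv.1 = "CLAUDE_AUTOCOMPACT_PCT_OVERRIDE" := by simpa using h1
      simp [e]
    · have e : kv.1 = "CLAUDE_CODE_MAX_OUTPUT_TOKENS" := by simpa using h2
      simp [e]
    · have e : kv.1 = "MAX_MCP_OUTPUT_TOKENS" := by simpa using h3
      simp [e]
    · have e : kv.1 = "MAX_THINKING_TOKENS" := by simpa using h4
      simp [e]
    · have f1 : (kv.1 == "CLAUDE_AUTOCOMPACT_PCT_OVERRIDE") = false := by simpa using h1
      have f2 : (kv.1 == "CLAUDE_CODE_MAX_OUTPUT_TOKENS") = false := by simpa using h2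
      have f3 : (kv.1 == "MAX_MCP_OUTPUT_TOKENS") = false := by simpa using h3
      have f4 : (kv.1 == "MAX_THINKING_TOKENS") = false := by simpa using h4
      simp [f1, f2, f3, f4]

-- B's output for a nonempty env, written from per-name membership conditions
theorem pv_alt_eq (l : List (String × String)) (hl : l ≠ []) :
    detect_user_pinned_alt (some l) =
      (if "CLAUDE_AUTOCOMPACT_PCT_OVERRIDE" ∈ l.map Prod.fst then ["CLAUDE_AUTOCOMPACT_PCT_OVERRIDE"] else []) ++
      (if "CLAUDE_CODE_MAX_OUTPUT_TOKENS" ∈ l.map Prod.fst then ["CLAUDE_CODE_MAX_OUTPUT_TOKENS"] else []) ++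
      (if "MAX_MCP_OUTPUT_TOKENS" ∈ l.map Prod.fst then ["MAX_MCP_OUTPUT_TOKENS"] else []) ++
      (if "MAX_THINKING_TOKENS" ∈ l.map Prod.fst then ["MAX_THINKING_TOKENS"] else []) := by
  have hm : ∀ n : String, (l.any (fun kv => kv.1 == n)) = decide (n ∈ l.map Prod.fst) := by
    intro n
    rw [Bool.eq_iff_iff]
    simp only [List.any_eq_true, decide_eq_true_eq, List.mem_map, beq_iff_eq]
  simp only [detect_user_pinned_alt, if_neg hl, pv_fold_spec, Bool.false_or, hm]
  by_cases h1 : "CLAUDE_AUTOCOMPACT_PCT_OVERRIDE" ∈ l.map Prod.fst <;>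
    by_cases h2 : "CLAUDE_CODE_MAX_OUTPUT_TOKENS" ∈ l.map Prod.fst <;>
      by_cases h3 : "MAX_MCP_OUTPUT_TOKENS" ∈ l.map Prod.fst <;>
        by_cases h4 : "MAX_THINKING_TOKENS" ∈ l.map Prod.fst <;>
          simp [h1, h2, h3, h4]

-- the keys of the dict built from l are the deduped first components of l
theorem pv_keys (l : List (String × String)) :
    (PySem.Dict.ofList l).keys = PySem.Set.ofList (l.map Prod.fst) := by
  have : PySem.Dict.ofList l =
      l.foldl (fun d p => d.insert p.1 p.2) PySem.Dict.empty := rfl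
  rw [this, PySem.Dict.keys_foldl_insert_key]
  simp [PySem.Set.update_nil_left]

-- B's append-of-ifs list is a permutation of A's filtered key set: both duplicate-free, same members
theorem pv_perm (l : List (String × String)) :
    ((if "CLAUDE_AUTOCOMPACT_PCT_OVERRIDE" ∈ l.map Prod.fst then ["CLAUDE_AUTOCOMPACT_PCT_OVERRIDE"] else []) ++
     (if "CLAUDE_CODE_MAX_OUTPUT_TOKENS" ∈ l.map Prod.fst then ["CLAUDE_CODE_MAX_OUTPUT_TOKENS"] else []) ++
     (if "MAX_MCP_OUTPUT_TOKENS" ∈ l.map Prod.fst then ["MAX_MCP_OUTPUT_TOKENS"] else []) ++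
     (if "MAX_THINKING_TOKENS" ∈ l.map Prod.fst then ["MAX_THINKING_TOKENS"] else [])).Perm
    ((PySem.Set.ofList (l.map Prod.fst)).filter
      (fun k => PySem.Set.contains
        (PySem.Set.ofList
          ["CLAUDE_CODE_MAX_OUTPUT_TOKENS", "MAX_THINKING_TOKENS",
           "CLAUDE_AUTOCOMPACT_PCT_OVERRIDE", "MAX_MCP_OUTPUT_TOKENS"]) k)) := by
  rw [List.perm_ext_iff_of_nodup]
  · intro a
    simp only [List.mem_filter, PySem.Set.mem_ofList, PySem.Set.contains_iff,
      List.mem_append, List.mem_ite_nil_right, List.mem_cons,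
      List.not_mem_nil, or_false]
    aesop
  · by_cases h1 : "CLAUDE_AUTOCOMPACT_PCT_OVERRIDE" ∈ l.map Prod.fst <;>
      by_cases h2 : "CLAUDE_CODE_MAX_OUTPUT_TOKENS" ∈ l.map Prod.fst <;>
        by_cases h3 : "MAX_MCP_OUTPUT_TOKENS" ∈ l.map Prod.fst <;>
          by_cases h4 : "MAX_THINKING_TOKENS" ∈ l.map Prod.fst <;>
            simp [h1, h2, h3, h4]
  · exact List.Nodup.filter _ (PySem.Set.nodup_ofList _)

-- B's list is strictly increasing: its four possible elements appear in alphabetical order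
theorem pv_pairwise (l : List (String × String)) :
    ((if "CLAUDE_AUTOCOMPACT_PCT_OVERRIDE" ∈ l.map Prod.fst then ["CLAUDE_AUTOCOMPACT_PCT_OVERRIDE"] else []) ++
     (if "CLAUDE_CODE_MAX_OUTPUT_TOKENS" ∈ l.map Prod.fst then ["CLAUDE_CODE_MAX_OUTPUT_TOKENS"] else []) ++
     (if "MAX_MCP_OUTPUT_TOKENS" ∈ l.map Prod.fst then ["MAX_MCP_OUTPUT_TOKENS"] else []) ++
     (if "MAX_THINKING_TOKENS" ∈ l.map Prod.fst then ["MAX_THINKING_TOKENS"] else [])).Pairwise (· < ·) := by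
  by_cases h1 : "CLAUDE_AUTOCOMPACT_PCT_OVERRIDE" ∈ l.map Prod.fst <;>
    by_cases h2 : "CLAUDE_CODE_MAX_OUTPUT_TOKENS" ∈ l.map Prod.fst <;>
      by_cases h3 : "MAX_MCP_OUTPUT_TOKENS" ∈ l.map Prod.fst <;>
        by_cases h4 : "MAX_THINKING_TOKENS" ∈ l.map Prod.fst <;>
          simp [h1, h2, h3, h4, String.lt_iff_toList_lt] <;> decide

-- A = B on a nonempty env
theorem pv_main (l : List (String × String)) (hl : l ≠ []) :
    detect_user_pinned (some l) = detect_user_pinned_alt (some l) := by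
  rw [pv_alt_eq l hl]
  simp only [detect_user_pinned, if_neg hl, pv_keys]
  exact PySem.List.sorted_eq_of_perm_of_pairwise_lt _ _ _ (pv_perm l) (pv_pairwise l)

-- ===== VERDICT =====
theorem detect_user_pinned_spec : Claim_equal_detect_user_pinned := by
  intro env _hdom
  unfold Spec_detect_user_pinned
  match env with
  | none => rfl
  | some l =>
    by_cases hl : l = []
    · simp [hl, detect_user_pinned, detect_user_pinned_alt]
    · exact pv_main l hl
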